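-- pv_equiv track=rewrite | github.com/elvis-gene/coding-practice | Udacity/num_loop_counter.py | loop_counter
-- ===== SOURCE A (Python) =====
-- def loop_counter(num):
--     num_and_value = {0:0, 1:0, 2:0, 3:0, 4:0, 5:0, 6:1, 7:0, 8:2, 9:1}
--
--     counter = 0
--     num_str = str(num)
--     for i in range(len(num_str)):
--         if num_str[i].isdigit():
--             counter += num_and_value.get(int(num_str[i]))
--
--     return counter
-- ===== SOURCE B (Python) =====
-- def loop_counter(num):
--     # Tabulate-then-combine: count the loop-bearing characters of str(num) once
--     # each and take the fixed weighted sum (an eight has two loops, a six and a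
--     # nine have one each).
--     s = str(num)
--     return s.count('6') + 2 * s.count('8') + s.count('9')
-- ===== Notes on version B (the rewrite author's own statement) =====
-- stated objective: simpler
-- what changed: Replaced the per-position index loop with its digit-parse and dict lookup per character by counting occurrences of the only loop-bearing characters in str(num) and returning their weighted sum, with the eight-character counted twice.
import Mathlib
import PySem

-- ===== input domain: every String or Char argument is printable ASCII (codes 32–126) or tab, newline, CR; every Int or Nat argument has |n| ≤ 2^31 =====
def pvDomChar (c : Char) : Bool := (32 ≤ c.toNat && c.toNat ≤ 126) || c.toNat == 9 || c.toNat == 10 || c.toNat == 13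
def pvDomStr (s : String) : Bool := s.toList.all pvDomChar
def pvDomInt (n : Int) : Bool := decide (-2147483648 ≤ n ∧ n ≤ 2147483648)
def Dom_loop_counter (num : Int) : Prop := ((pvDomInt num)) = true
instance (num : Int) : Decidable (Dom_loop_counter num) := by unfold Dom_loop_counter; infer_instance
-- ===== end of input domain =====

-- B replaces A's per-position parse-and-lookup loop with three character counts and a
-- fixed weighted sum (simpler; same return value).

-- ===== PORT A =====
-- str(num)[i] is a one-character string; its .isdigit() is Chars.isdigit of that character,
-- and int(str(num)[i]) is PySem.Int.ofChars? on that single character (always parses there).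
-- num_and_value.get(k) is Python dict.get; the key (a digit value 0–9) is always present,
-- so the returned Option is always some: .getD 0 is exact on every reached input.
def loop_counter (num : Int) : Int :=
  let num_and_value : PySem.Dict Int Int :=
    PySem.Dict.ofList [(0,0),(1,0),(2,0),(3,0),(4,0),(5,0),(6,1),(7,0),(8,2),(9,1)]
  let num_str := (PySem.Int.toStr num).toList
  (PySem.List.pyRange 0 (PySem.List.len num_str) 1).foldl
    (fun counter i =>
      if PySem.Chars.isdigit (PySem.List.pyGetD num_str i ' ') then
        counter +
          (num_and_value.get?
            ((PySem.Int.ofChars? [PySem.List.pyGetD num_str i ' ']).getD 0)).getD 0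
      else counter) 0

-- ===== PORT B =====
def loop_counter_alt (num : Int) : Int :=
  let s := (PySem.Int.toStr num).toList
  (PySem.Chars.count s ['6'] : Int) + 2 * (PySem.Chars.count s ['8'] : Int)
    + (PySem.Chars.count s ['9'] : Int)

-- ===== PRECONDITION & SPEC =====
def Spec_loop_counter (num : Int) (out : Int) : Prop := out = loop_counter_alt num
instance (num : Int) (out : Int) : Decidable (Spec_loop_counter num out) := by unfold Spec_loop_counter; infer_instance

-- ===== CLAIM (what is proved, stated in full; the proofs are below) =====
def Claim_equal_loop_counter : Prop := ∀ (num : Int), Dom_loop_counter num → Spec_loop_counter num (loop_counter num)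

-- ===== LEMMAS AND PROOFS =====

-- A's dict body, named for the proofs.
def pvDict : PySem.Dict Int Int :=
  PySem.Dict.ofList [(0,0),(1,0),(2,0),(3,0),(4,0),(5,0),(6,1),(7,0),(8,2),(9,1)]

-- What A adds for one digit character, as a function of the character.
theorem pv_step_digit (c : Char) (h : PySem.Chars.isdigit c = true) :
    ((pvDict.get? ((PySem.Int.ofChars? [c]).getD 0)).getD 0 : Int)
      = (if c = '6' then 1 else if c = '8' then 2 else if c = '9' then 1 else 0) := by
  simp [PySem.Chars.isdigit] at h
  obtain ⟨h1, h2⟩ := h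
  have hn1 : 48 ≤ c.toNat := h1
  have hn2 : c.toNat ≤ 57 := h2
  have hc : c = Char.ofNat c.toNat := by simp [Char.ofNat_toNat]
  interval_cases hcn : c.toNat <;> rw [hc] <;> decide

-- PySem.Chars.count with a one-character needle is the plain character count.
theorem pv_go_single (c : Char) : ∀ (s : List Char) (acc : Nat),
    PySem.Chars.count.go [c] s.length s acc = acc + s.count c
  | [], acc => by simp [PySem.Chars.count.go]
  | h :: t, acc => by
    rw [List.length_cons, PySem.Chars.count.go]
    by_cases hc : h = c
    · simp [hc, List.isPrefixOf, pv_go_single c t (acc + 1)]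
      omega
    · simp [List.isPrefixOf, Ne.symm hc, hc, pv_go_single c t acc]

theorem pv_count_single (s : List Char) (c : Char) :
    PySem.Chars.count s [c] = s.count c := by
  simp [PySem.Chars.count, pv_go_single]

-- A's fold is the weighted character count.
theorem pv_fold_weight (s : List Char) (a : Int) :
    s.foldl (fun counter c =>
        if PySem.Chars.isdigit c then
          counter + (pvDict.get? ((PySem.Int.ofChars? [c]).getD 0)).getD 0
        else counter) a
      = a + (s.count '6' : Int) + 2 * (s.count '8' : Int) + (s.count '9' : Int) := by
  induction s generalizing a with
  | nil => simp
  | cons c t ih =>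
    rw [List.foldl_cons, ih]
    by_cases hd : PySem.Chars.isdigit c = true
    · rw [if_pos hd, pv_step_digit c hd]
      by_cases h6 : c = '6' <;> by_cases h8 : c = '8' <;> by_cases h9 : c = '9' <;>
        simp_all [List.count_cons] <;> push_cast <;> ring
    · have h6 : c ≠ '6' := by rintro rfl; exact absurd hd (by decide)
      have h8 : c ≠ '8' := by rintro rfl; exact absurd hd (by decide)
      have h9 : c ≠ '9' := by rintro rfl; exact absurd hd (by decide)
      rw [if_neg hd]
      simp [List.count_cons, h6, h8, h9]

-- ===== VERDICT (by name: the statement is the Claim_ definition above) =====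
theorem loop_counter_spec : Claim_equal_loop_counter := by
  intro num _
  unfold Spec_loop_counter loop_counter loop_counter_alt
  dsimp only
  rw [show (PySem.Dict.ofList [(0,0),(1,0),(2,0),(3,0),(4,0),(5,0),(6,1),(7,0),(8,2),(9,1)] : PySem.Dict Int Int) = pvDict from rfl]
  rw [PySem.List.foldl_pyRange_zero_pyGetD ((PySem.Int.toStr num).toList) ' '
    (fun counter c =>
      if PySem.Chars.isdigit c then
        counter + (pvDict.get? ((PySem.Int.ofChars? [c]).getD 0)).getD 0
      else counter) 0]
  rw [pv_fold_weight]
  simp [pv_count_single]
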